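-- pv_equiv track=rewrite | github.com/Erik477/-2022-SWP-PYTHON- | Pokerspielsimulator.py | Flush
-- ===== SOURCE A (Python) =====
-- def Flush(Karten):
--     Herz = 0
--     Karo = 0
--     Pik = 0
--     Kreuz = 0
--     nr = 0
--
--     for x in range(len(Karten)):
--         nr = Karten[x][0]
--         if nr == 0:
--             Herz += 1
--         elif nr == 1:
--             Karo += 1
--         elif nr == 2:
--             Pik += 1
--         elif nr == 3:
--             Kreuz += 1
--
--     if Herz >= 5 or Karo >= 5 or Pik >= 5 or Kreuz >= 5:
--         return True
--     else:
--         return False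
-- ===== SOURCE B (Python) =====
-- def Flush(Karten):
--     return any(sum(1 for c in Karten if c[0] == s) >= 5 for s in range(4))
-- ===== Notes on version B (the rewrite author's own statement) =====
-- stated objective: idiomatic
-- what changed: Replaces the single pass with four explicit mutable suit counters by a per-suit count (any/sum generator expressions over suits 0..3), short-circuiting once a suit with 5+ cards is found.
import Mathlib
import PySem

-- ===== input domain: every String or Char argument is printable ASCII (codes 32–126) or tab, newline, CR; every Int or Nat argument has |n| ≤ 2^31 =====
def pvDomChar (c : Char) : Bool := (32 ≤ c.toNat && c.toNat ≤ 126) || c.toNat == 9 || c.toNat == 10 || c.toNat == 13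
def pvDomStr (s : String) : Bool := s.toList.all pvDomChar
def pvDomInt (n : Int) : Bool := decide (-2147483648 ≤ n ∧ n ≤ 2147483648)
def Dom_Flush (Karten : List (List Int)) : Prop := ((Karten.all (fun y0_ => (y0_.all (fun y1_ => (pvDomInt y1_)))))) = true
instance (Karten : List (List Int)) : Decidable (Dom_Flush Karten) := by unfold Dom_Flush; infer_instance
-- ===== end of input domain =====

-- B counts each suit separately; both proofs are about the return value only.
-- ===== PORT A =====
-- one pass, four counters; `Karten[x][0]` ported with pyGet? (none = IndexError, excluded by Pre_)
def Flush (Karten : List (List Int)) : Bool :=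
  let st := Karten.foldl (fun (s : Int × Int × Int × Int) (c : List Int) =>
    match PySem.List.pyGet? c 0 with
    | none => s  -- Python raises IndexError here; excluded by Pre_Flush
    | some nr =>
      if nr = 0 then (s.1 + 1, s.2.1, s.2.2.1, s.2.2.2)
      else if nr = 1 then (s.1, s.2.1 + 1, s.2.2.1, s.2.2.2)
      else if nr = 2 then (s.1, s.2.1, s.2.2.1 + 1, s.2.2.2)
      else if nr = 3 then (s.1, s.2.1, s.2.2.1, s.2.2.2 + 1)
      else s) (0, 0, 0, 0)
  decide (st.1 ≥ 5 ∨ st.2.1 ≥ 5 ∨ st.2.2.1 ≥ 5 ∨ st.2.2.2 ≥ 5)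

-- ===== PORT B =====
def Flush_alt (Karten : List (List Int)) : Bool :=
  (PySem.List.pyRange 0 4 1).any (fun s =>
    decide ((Karten.countP (fun c => PySem.List.pyGet? c 0 == some s) : Int) ≥ 5))

-- ===== PRECONDITION & SPEC =====
-- Pre_ excludes hands containing an empty card list: Python's `Karten[x][0]` raises IndexError there.
def Pre_Flush (Karten : List (List Int)) : Prop := ∀ c ∈ Karten, c ≠ []
instance (Karten : List (List Int)) : Decidable (Pre_Flush Karten) := by unfold Pre_Flush; infer_instance
def pvWitness_Flush : List (List Int) := [[0, 10], [1, 2], [0, 3]]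
def Spec_Flush (Karten : List (List Int)) (out : Bool) : Prop := out = Flush_alt Karten
instance (Karten : List (List Int)) (out : Bool) : Decidable (Spec_Flush Karten out) := by unfold Spec_Flush; infer_instance

-- ===== CLAIM (what is proved, stated in full; the proofs are below) =====
def Claim_equal_Flush : Prop := ∀ (Karten : List (List Int)), Dom_Flush Karten → Pre_Flush Karten → Spec_Flush Karten (Flush Karten)

-- ===== LEMMAS AND PROOFS =====

def pvCnt (s : Int) (Karten : List (List Int)) : Nat :=
  Karten.countP (fun c => PySem.List.pyGet? c 0 == some s)

theorem pvFoldEq (Karten : List (List Int)) (a b c d : Int) :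
    Karten.foldl (fun (s : Int × Int × Int × Int) (c : List Int) =>
      match PySem.List.pyGet? c 0 with
      | none => s
      | some nr =>
        if nr = 0 then (s.1 + 1, s.2.1, s.2.2.1, s.2.2.2)
        else if nr = 1 then (s.1, s.2.1 + 1, s.2.2.1, s.2.2.2)
        else if nr = 2 then (s.1, s.2.1, s.2.2.1 + 1, s.2.2.2)
        else if nr = 3 then (s.1, s.2.1, s.2.2.1, s.2.2.2 + 1)
        else s) (a, b, c, d)
    = (a + pvCnt 0 Karten, b + pvCnt 1 Karten, c + pvCnt 2 Karten, d + pvCnt 3 Karten) := by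
  induction Karten generalizing a b c d with
  | nil => simp [pvCnt]
  | cons hd tl ih =>
    simp only [List.foldl_cons]
    rcases h : PySem.List.pyGet? hd 0 with _ | nr
    · simp [pvCnt, h, ih]
    · by_cases h0 : nr = 0
      · simp [pvCnt, h, h0, ih]; omega
      · by_cases h1 : nr = 1
        · simp [pvCnt, h, h1, ih]; omega
        · by_cases h2 : nr = 2
          · simp [pvCnt, h, h2, ih]; omega
          · by_cases h3 : nr = 3
            · simp [pvCnt, h, h3, ih]; omega
            · simp [pvCnt, h, h0, h1, h2, h3, ih]

-- ===== VERDICT (by name: the statement is the Claim_ definition above) =====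
theorem Flush_spec : Claim_equal_Flush := by
  intro Karten _ _
  unfold Spec_Flush Flush Flush_alt
  rw [pvFoldEq]
  have hr : PySem.List.pyRange 0 4 1 = [0, 1, 2, 3] := by decide
  simp only [hr, List.any_cons, List.any_nil, Bool.or_false, pvCnt]
  rw [Bool.eq_iff_iff]
  simp only [decide_eq_true_eq, Bool.or_eq_true]
  omega
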